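-- pv_equiv track=rewrite | github.com/bruno-ah-um/advent_of_code_2025 | 10/10.py | calculate
-- ===== SOURCE A (Python) =====
-- def calculate(combo, pattern):
--     result = ['.'] * len(pattern)
--     for tup in combo:
--         for idx in tup:
--             if idx < 0 or idx >= len(result):
--                 continue  # skip invalid indices
--             result[idx] = '#' if result[idx] == '.' else '.'
--     result_str = ''.join(result)
--     return result_str == pattern
-- ===== SOURCE B (Python) =====
-- def calculate(combo, pattern):
--     # If pattern contains anything but '.'/'#', A's built string can never equal it.
--     if any(ch != '.' and ch != '#' for ch in pattern):
--         return False
--     n = len(pattern)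
--     # Multiset cancellation: the toggled string equals pattern iff the combined
--     # multiset of valid combo indices plus pattern's '#' positions has even
--     # multiplicity everywhere.  After sorting, that holds iff the list splits
--     # into adjacent equal pairs, checked by a single scan.
--     idxs = [i for tup in combo for i in tup if 0 <= i < n]
--     idxs += [i for i in range(n) if pattern[i] == '#']
--     idxs.sort()
--     hold = None
--     for x in idxs:
--         if hold is None:
--             hold = x
--         elif hold == x:
--             hold = None
--         else:
--             return False
--     return hold is None
-- ===== Notes on version B (the rewrite author's own statement) =====
-- stated objective: alternative
-- what changed: B never builds or toggles a result buffer: it rejects patterns with foreign characters, merges the valid combo indices with the positions of '#' in pattern into one list, sorts it, and answers true iff the sorted list splits into adjacent equal pairs (multiset cancellation: the toggled string equals pattern iff every index occurs an even number of times in the merged multiset).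
import Mathlib
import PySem

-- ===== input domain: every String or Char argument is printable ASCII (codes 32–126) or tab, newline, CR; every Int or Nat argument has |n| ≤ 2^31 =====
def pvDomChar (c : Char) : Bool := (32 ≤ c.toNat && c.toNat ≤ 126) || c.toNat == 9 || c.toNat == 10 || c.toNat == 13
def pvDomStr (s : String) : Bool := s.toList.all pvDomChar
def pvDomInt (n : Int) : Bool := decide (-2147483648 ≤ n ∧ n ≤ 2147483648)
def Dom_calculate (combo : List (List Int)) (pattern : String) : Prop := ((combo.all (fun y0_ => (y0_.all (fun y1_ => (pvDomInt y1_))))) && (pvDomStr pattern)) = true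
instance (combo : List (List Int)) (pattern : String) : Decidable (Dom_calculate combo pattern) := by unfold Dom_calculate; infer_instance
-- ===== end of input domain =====

-- B replaces A's in-place toggled '.'/'#' buffer and string comparison by multiset cancellation:
-- it merges the valid combo indices with pattern's '#' positions, sorts, and checks that the
-- sorted list splits into adjacent equal pairs (alternative algorithm, sort-based).


-- ===== PORT A =====
-- toggle step: `if idx < 0 or idx >= len(result): continue; result[idx] = '#' if result[idx]=='.' else '.'`
def toggleA (res : List Char) (idx : Int) : List Char :=
  if idx < 0 || (res.length : Int) ≤ idx then res
  else res.set idx.toNat (if res.getD idx.toNat ' ' == '.' then '#' else '.')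

def calculate (combo : List (List Int)) (pattern : String) : Bool :=
  let result := combo.foldl (fun res tup => tup.foldl toggleA res)
      (List.replicate pattern.toList.length '.')
  -- ''.join(result) == pattern: string equality ported exactly as char-list equality
  result == pattern.toList

-- ===== PORT B =====
-- the `for x in idxs:` pair-scan with its early `return False`; `hold` is the pending element
def pairScan (hold : Option Int) : List Int → Bool
  | [] => hold == none
  | x :: t =>
    match hold with
    | none => pairScan (some x) t
    | some a => if a == x then pairScan none t else false

def calculate_alt (combo : List (List Int)) (pattern : String) : Bool :=
  let cs := pattern.toList
  if cs.any (fun ch => ch != '.' && ch != '#') then false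
  else
    let n : Int := cs.length
    -- [i for tup in combo for i in tup if 0 <= i < n]
    let idxs := combo.flatMap (fun tup => tup.filter (fun i => decide (0 ≤ i) && decide (i < n)))
    -- idxs += [i for i in range(n) if pattern[i] == '#']
    let idxs2 := idxs ++ (PySem.List.pyRange 0 n 1).filter (fun i => PySem.List.pyGet? cs i == some '#')
    -- idxs.sort()
    pairScan none (PySem.List.sorted idxs2 (fun x => x) false)

-- ===== PRECONDITION & SPEC =====
def Spec_calculate (combo : List (List Int)) (pattern : String) (out : Bool) : Prop := out = calculate_alt combo pattern
instance (combo : List (List Int)) (pattern : String) (out : Bool) : Decidable (Spec_calculate combo pattern out) := by unfold Spec_calculate; infer_instance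

-- ===== CLAIM (what is proved, stated in full; the proofs are below) =====
def Claim_equal_calculate : Prop := ∀ (combo : List (List Int)) (pattern : String), Dom_calculate combo pattern → Spec_calculate combo pattern (calculate combo pattern)

-- ===== LEMMAS AND PROOFS =====

/-- '#' for an odd count, '.' for an even one. -/
def parityChar (k : Nat) : Char := if k % 2 == 1 then '#' else '.'

/-- A's buffer expressed from a count function: position k shows the parity of the count at k. -/
def buf (f : Int → Nat) (n : Nat) : List Char :=
  (List.range n).map (fun (k : Nat) => parityChar (f (k : Int)))

/-- one increment of the count function -/
def bump (f : Int → Nat) (idx : Int) : Int → Nat := fun j => if j = idx then f j + 1 else f j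

theorem buf_length (f : Int → Nat) (n : Nat) : (buf f n).length = n := by simp [buf]

theorem buf_getElem (f : Int → Nat) {n k : Nat} (hk : k < n) :
    (buf f n)[k]'(by simpa [buf] using hk) = parityChar (f (k : Int)) := by
  simp only [buf, List.getElem_map, List.getElem_range]

theorem buf_empty (n : Nat) : buf (fun _ => 0) n = List.replicate n '.' := by
  simp [buf, parityChar]

theorem parity_succ (k : Nat) :
    (if parityChar k == '.' then '#' else '.') = parityChar (k + 1) := by
  simp only [parityChar]
  rcases Nat.mod_two_eq_zero_or_one k with h | h <;> simp [h, Nat.add_mod]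

theorem toggle_buf (f : Int → Nat) (n : Nat) (idx : Int) :
    toggleA (buf f n) idx = buf (bump f idx) n := by
  unfold toggleA
  rw [buf_length]
  by_cases h : idx < 0 ∨ (n : Int) ≤ idx
  · rw [if_pos (by simpa using h)]
    unfold buf
    refine List.map_congr_left fun k hk => ?_
    have hk' := List.mem_range.mp hk
    have hne : (k : Int) ≠ idx := by rcases h with h | h <;> omega
    simp [bump, hne]
  · rw [if_neg (by simpa using h)]
    have h' : ¬ (idx < 0 ∨ (n : Int) ≤ idx) := h
    have h0 : 0 ≤ idx := by omega
    have hltn : idx < (n : Int) := by omega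
    have hlt : idx.toNat < n := by omega
    have hidx : ((idx.toNat : Nat) : Int) = idx := by omega
    apply List.ext_getElem (by simp [buf])
    intro k hk1 hk2
    have hk : k < n := by simpa [buf] using hk2
    by_cases hkj : k = idx.toNat
    · subst hkj
      rw [List.getElem_set_self, buf_getElem (bump f idx) hk, hidx]
      have hbk : (buf f n).getD idx.toNat ' ' = parityChar (f idx) := by
        rw [List.getD_eq_getElem _ _ (by simpa [buf] using hlt), buf_getElem f hlt, hidx]
      rw [hbk]
      simp only [bump]
      exact parity_succ _
    · rw [List.getElem_set_ne (by omega), buf_getElem f hk, buf_getElem (bump f idx) hk]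
      have hne : (k : Int) ≠ idx := by omega
      simp [bump, hne]

theorem inner_buf (tup : List Int) (f : Int → Nat) (n : Nat) :
    tup.foldl toggleA (buf f n) = buf (tup.foldl bump f) n := by
  induction tup generalizing f with
  | nil => rfl
  | cons x xs ih => simp only [List.foldl_cons, toggle_buf]; exact ih _

theorem outer_buf (combo : List (List Int)) (f : Int → Nat) (n : Nat) :
    combo.foldl (fun res tup => tup.foldl toggleA res) (buf f n) =
      buf (combo.foldl (fun f tup => tup.foldl bump f) f) n := by
  induction combo generalizing f with
  | nil => rfl
  | cons t ts ih => simp only [List.foldl_cons, inner_buf]; exact ih _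

theorem foldl_bump_count (L : List Int) (f : Int → Nat) (v : Int) :
    (L.foldl bump f) v = f v + L.count v := by
  induction L generalizing f with
  | nil => simp
  | cons x xs ih =>
    rw [List.foldl_cons, ih, List.count_cons]
    by_cases hv : x = v <;> simp [bump, hv] <;> omega

theorem nested_bump_count (combo : List (List Int)) (f : Int → Nat) (v : Int) :
    (combo.foldl (fun f tup => tup.foldl bump f) f) v = f v + (combo.flatMap id).count v := by
  induction combo generalizing f with
  | nil => simp
  | cons t ts ih =>
    rw [List.foldl_cons, ih, foldl_bump_count]
    simp [List.count_append]
    omega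

theorem buf_eq_iff (f : Int → Nat) (cs : List Char) :
    buf f cs.length = cs ↔
      ∀ k, (hk : k < cs.length) → cs[k] = parityChar (f (k : Int)) := by
  constructor
  · intro h k hk
    have := congrArg (fun l => l[k]?) h
    simp only [List.getElem?_eq_getElem hk,
      List.getElem?_eq_getElem (show k < (buf f cs.length).length by simpa [buf] using hk)] at this
    rw [buf_getElem f hk] at this
    exact (Option.some.injEq _ _ ▸ this).symm
  · intro h
    apply List.ext_getElem (by simp [buf])
    intro k hk1 hk2
    have hk : k < cs.length := by simpa [buf] using hk1
    rw [buf_getElem f hk, (h k hk)]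

/-- A characterised: true iff every position's char is the toggle parity of its count. -/
theorem calcA_char (combo : List (List Int)) (pattern : String) :
    calculate combo pattern = true ↔
      ∀ k, (hk : k < pattern.toList.length) →
        pattern.toList[k] = parityChar ((combo.flatMap id).count ((k : Nat) : Int)) := by
  unfold calculate
  rw [← buf_empty, outer_buf, beq_iff_eq]
  have hf : (combo.foldl (fun f tup => tup.foldl bump f) (fun _ => 0)) =
      fun v => (combo.flatMap id).count v := by
    funext v; rw [nested_bump_count]; simp
  rw [hf, buf_eq_iff]

-- pairScan facts
theorem pairScan_cons_cons (a b : Int) (t : List Int) :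
    pairScan none (a :: b :: t) = ((a == b) && pairScan none t) := by
  by_cases h : a = b <;> simp [pairScan, h]

theorem pairScan_even : ∀ (N : Nat) (L : List Int), L.length ≤ N → L.Pairwise (· ≤ ·) →
    (pairScan none L = true ↔ ∀ v : Int, L.count v % 2 = 0) := by
  intro N
  induction N with
  | zero =>
    intro L hL _
    have : L = [] := List.length_eq_zero_iff.mp (Nat.le_zero.mp hL)
    subst this; simp [pairScan]
  | succ N ih =>
    intro L hL hs
    match L with
    | [] => simp [pairScan]
    | [a] =>
      simp only [pairScan]
      constructor
      · intro h; cases h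
      · intro h
        have := h a
        simp at this
    | a :: b :: t =>
      rw [pairScan_cons_cons]
      have hst : t.Pairwise (· ≤ ·) := hs.tail.tail
      have hN : t.length ≤ N := by simp at hL; omega
      have iht := ih t hN hst
      constructor
      · intro h v
        have hab : a = b := by
          have := (Bool.and_eq_true _ _).mp h |>.1
          exact beq_iff_eq.mp this
        have ht := iht.mp ((Bool.and_eq_true _ _).mp h |>.2)
        subst hab
        have hv := ht v
        simp only [List.count_cons]
        split_ifs <;> omega
      · intro h
        have hmem : a ∈ b :: t := by
          have hc := h a
          rw [List.count_cons_self] at hc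
          have hne : (b :: t).count a ≠ 0 := by omega
          exact List.count_pos_iff.mp (Nat.pos_of_ne_zero hne)
        have hab : a = b := by
          rcases List.mem_cons.mp hmem with h1 | h1
          · exact h1
          · have hle1 : a ≤ b := (List.pairwise_cons.mp hs).1 b (by simp)
            have hle2 : b ≤ a := (List.pairwise_cons.mp hs.tail).1 a h1
            omega
        subst hab
        have ht : ∀ v : Int, t.count v % 2 = 0 := by
          intro v
          have hv := h v
          simp only [List.count_cons] at hv
          split_ifs at hv <;> omega
        simp [iht.mpr ht]

/-- the flattened filtered comprehension is the filter of the flattened list -/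
theorem flatMap_filter (combo : List (List Int)) (p : Int → Bool) :
    combo.flatMap (fun tup => tup.filter p) = (combo.flatMap id).filter p := by
  induction combo with
  | nil => rfl
  | cons t ts ih => simp [List.flatMap_cons, List.filter_append, ih]

theorem count_filter_pos {p : Int → Bool} {v : Int} (L : List Int) (h : p v = true) :
    (L.filter p).count v = L.count v := by
  induction L with
  | nil => rfl
  | cons x xs ih =>
    by_cases hx : p x = true
    · rw [List.filter_cons_of_pos hx, List.count_cons, List.count_cons, ih]
    · rw [List.filter_cons_of_neg hx]
      have hxv : ¬ (x == v) = true := fun hc => hx (beq_iff_eq.mp hc ▸ h)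
      rw [List.count_cons, ih]
      simp [hxv]

theorem count_eq_zero_of_not_mem' {v : Int} {L : List Int} (h : v ∉ L) : L.count v = 0 :=
  List.count_eq_zero.mpr h

-- the '#'-position list
theorem hashList_count (cs : List Char) (v : Int) :
    ((PySem.List.pyRange 0 (cs.length : Int) 1).filter
        (fun i => PySem.List.pyGet? cs i == some '#')).count v =
      if h : 0 ≤ v ∧ v < (cs.length : Int) then
        (if cs[v.toNat]'(by omega) = '#' then 1 else 0) else 0 := by
  set H := (PySem.List.pyRange 0 (cs.length : Int) 1).filter
      (fun i => PySem.List.pyGet? cs i == some '#') with hH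
  have hnd : H.Nodup := (PySem.List.nodup_pyRange_one 0 (cs.length : Int)).filter _
  have hmem : ∀ w : Int, w ∈ H ↔ (0 ≤ w ∧ w < (cs.length : Int)) ∧
      PySem.List.pyGet? cs w = some '#' := by
    intro w
    rw [hH, List.mem_filter, PySem.List.mem_pyRange_one]
    simp
  by_cases h : 0 ≤ v ∧ v < (cs.length : Int)
  · rw [dif_pos h]
    have hv : v = ((v.toNat : Nat) : Int) := by omega
    have hget : PySem.List.pyGet? cs v = cs[v.toNat]? := by
      have hx := PySem.List.pyGet?_natCast cs v.toNat
      rw [← hv] at hx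
      exact hx
    by_cases hc : cs[v.toNat]'(by omega) = '#'
    · rw [if_pos hc]
      have hm : v ∈ H := (hmem v).mpr ⟨h, by
        rw [hget, List.getElem?_eq_getElem (by omega), hc]⟩
      have h1 : 1 ≤ H.count v := List.count_pos_iff.mpr hm
      have h2 : H.count v ≤ 1 := List.nodup_iff_count_le_one.mp hnd v
      omega
    · rw [if_neg hc]
      refine count_eq_zero_of_not_mem' (fun hm => hc ?_)
      have hx := ((hmem v).mp hm).2
      rw [hget, List.getElem?_eq_getElem (by omega)] at hx
      exact Option.some.inj hx
  · rw [dif_neg h]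
    refine count_eq_zero_of_not_mem' (fun hm => h ((hmem v).mp hm).1)

theorem parity_match (m : Nat) (ch : Char) (h : ch = '.' ∨ ch = '#') :
    ch = parityChar m ↔ (m + (if ch = '#' then 1 else 0)) % 2 = 0 := by
  rcases Nat.mod_two_eq_zero_or_one m with hm | hm <;> rcases h with h | h <;> subst h <;>
    simp [parityChar, hm, Nat.add_mod]

-- ===== VERDICT (by name: the statement is the Claim_ definition above) =====
theorem calculate_spec : Claim_equal_calculate := by
  intro combo pattern _
  unfold Spec_calculate
  set cs := pattern.toList with hcs
  by_cases hbad : cs.any (fun ch => ch != '.' && ch != '#') = true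
  · -- pattern contains a foreign char: both sides are false
    have hB : calculate_alt combo pattern = false := by
      unfold calculate_alt; rw [← hcs, if_pos hbad]
    rw [hB]
    rcases List.any_eq_true.mp hbad with ⟨ch, hch, hprop⟩
    rcases List.mem_iff_getElem.mp hch with ⟨k, hk, hval⟩
    refine Bool.eq_false_iff.mpr (fun hA => ?_)
    have hpc := (calcA_char combo pattern).mp hA k hk
    have hce : ch = parityChar ((combo.flatMap id).count ((k : Nat) : Int)) := by
      rw [← hval]; exact hpc
    subst hce
    simp [parityChar] at hprop
    omega
  · -- every char is '.' or '#'
    have hgood : ∀ ch ∈ cs, ch = '.' ∨ ch = '#' := by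
      intro ch hch
      by_contra hc
      push Not at hc
      exact hbad (List.any_eq_true.mpr ⟨ch, hch, by simp [hc.1, hc.2]⟩)
    have hB : calculate_alt combo pattern =
        pairScan none (PySem.List.sorted
          ((combo.flatMap (fun tup => tup.filter
              (fun i => decide (0 ≤ i) && decide (i < (cs.length : Int))))) ++
            (PySem.List.pyRange 0 (cs.length : Int) 1).filter
              (fun i => PySem.List.pyGet? cs i == some '#'))
          (fun x => x) false) := by
      unfold calculate_alt; rw [← hcs, if_neg hbad]
    rw [hB]
    set p : Int → Bool := fun i => decide (0 ≤ i) && decide (i < (cs.length : Int)) with hp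
    set C := (combo.flatMap (fun tup => tup.filter p)) ++
        (PySem.List.pyRange 0 (cs.length : Int) 1).filter
          (fun i => PySem.List.pyGet? cs i == some '#') with hC
    set L := PySem.List.sorted C (fun x => x) false with hL
    have hsorted : L.Pairwise (· ≤ ·) := by
      have := PySem.List.sorted_pairwise C (fun x => x)
      simpa using this
    have hperm : L.Perm C := PySem.List.sorted_perm C (fun x => x) false
    have hiff := pairScan_even L.length L (le_refl _) hsorted
    have hcount : ∀ v : Int, L.count v = C.count v := fun v => hperm.count_eq v
    -- the combined-count condition matches A's characterisation
    rw [Bool.eq_iff_iff, calcA_char, hiff, ← hcs]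
    constructor
    · intro hA v
      rw [hcount, hC, List.count_append, hashList_count]
      by_cases hv : 0 ≤ v ∧ v < (cs.length : Int)
      · rw [dif_pos hv]
        have hk : v.toNat < cs.length := by omega
        have hvk : v = ((v.toNat : Nat) : Int) := by omega
        have hch := hA v.toNat hk
        have hgd := hgood _ (List.getElem_mem hk)
        rw [flatMap_filter, count_filter_pos _ (by simp [hp]; omega)]
        rw [parity_match _ _ hgd] at hch
        rw [← hvk] at hch
        by_cases hc : cs[v.toNat]'hk = '#' <;> simp [hc] at hch ⊢ <;> omega
      · rw [dif_neg hv]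
        rw [flatMap_filter]
        have : v ∉ (combo.flatMap id).filter p := by
          intro hm
          have := (List.mem_filter.mp hm).2
          simp [hp] at this
          omega
        rw [count_eq_zero_of_not_mem' this]
    · intro hall k hk
      have hvk : ((k : Nat) : Int).toNat = k := by omega
      have hbound : 0 ≤ ((k : Nat) : Int) ∧ ((k : Nat) : Int) < (cs.length : Int) := by omega
      have := hall ((k : Nat) : Int)
      rw [hcount, hC, List.count_append, hashList_count, dif_pos hbound,
        flatMap_filter, count_filter_pos _ (by simp [hp]; omega)] at this
      have hgd := hgood _ (List.getElem_mem hk)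
      rw [parity_match _ _ hgd]
      simp only [hvk] at this
      by_cases hc : cs[k]'hk = '#' <;> simp [hc] at this ⊢ <;> omega
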